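-- pv_equiv track=rewrite | github.com/Hushcoder/DSA-PYTHON | Array/max_subarray_sum.py | max_arr_sum
-- ===== SOURCE A (Python) =====
-- def max_arr_sum(A, N, k):
--     from collections import defaultdict
--
--     left = 0
--     freq = defaultdict(int)
--     max_sum = 0
--     curr_sum = 0
--
--     for right in range(N):
--         freq[A[right]] += 1
--         curr_sum += A[right]
--
--         while len(freq) > k:
--             freq[A[left]] -= 1
--             curr_sum -= A[left]
--
--             if freq[A[left]] == 0:
--                 del freq[A[left]]
--
--             left += 1
--         max_sum = max(max_sum, curr_sum)
--
--     return max_sum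
-- ===== SOURCE B (Python) =====
-- def max_arr_sum(A, N, k):
--     # For each endpoint, scan leftward to the longest window with <= k distinct
--     # elements ending there, and take the best window sum (floored at 0).
--     best = 0
--     for right in range(N):
--         seen = set()
--         s = 0
--         i = right
--         while i >= 0 and (A[i] in seen or len(seen) < k):
--             seen.add(A[i])
--             s += A[i]
--             i -= 1
--         best = max(best, s)
--     return best
-- ===== Notes on version B (the rewrite author's own statement) =====
-- stated objective: alternative
-- what changed: Replaces the amortized forward sliding window with a frequency dict by an independent backward scan per endpoint that rebuilds the longest <=k-distinct window ending there with a fresh set; slower on large inputs, but a genuinely different decomposition.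
-- crash fix: On inputs with k < 0 and 0 < N <= len(A), A's while-loop walks the left pointer off the array and raises IndexError, while B returns the best window sum (0, since no window is valid). — e.g. on max_arr_sum([5], 1, -1): A raises IndexError, B returns 0
import Mathlib
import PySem

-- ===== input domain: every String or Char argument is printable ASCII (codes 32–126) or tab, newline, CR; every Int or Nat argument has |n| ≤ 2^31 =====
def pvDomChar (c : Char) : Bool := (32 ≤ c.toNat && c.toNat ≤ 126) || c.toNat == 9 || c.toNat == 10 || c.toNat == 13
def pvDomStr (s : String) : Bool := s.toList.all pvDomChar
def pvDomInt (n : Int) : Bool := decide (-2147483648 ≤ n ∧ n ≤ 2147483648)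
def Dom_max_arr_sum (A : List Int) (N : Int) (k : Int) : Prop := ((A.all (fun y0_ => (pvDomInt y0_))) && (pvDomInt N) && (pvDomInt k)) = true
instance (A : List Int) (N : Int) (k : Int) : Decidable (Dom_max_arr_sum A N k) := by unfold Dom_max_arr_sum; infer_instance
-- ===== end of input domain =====

-- B replaces A's amortized forward sliding window (frequency dict, moving left pointer)
-- by an independent backward scan per endpoint that rebuilds the longest ≤k-distinct
-- window ending there with a fresh set; same results, no speed claim.

-- ===== PORT A =====
-- inner `while len(freq) > k` loop of A; state (left, freq, curr_sum).
-- Fuel bounds the iterations (left advances by 1 each turn and under Pre_ the loop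
-- stops before left walks past the window); pyGet? = none is Python's IndexError,
-- unreachable under Pre_.
def maxArrSumWhile (A : List Int) (k : Int) :
    Nat → Int → PySem.Dict Int Int → Int → (Int × PySem.Dict Int Int × Int)
  | 0, left, freq, curr => (left, freq, curr)
  | fuel+1, left, freq, curr =>
    if (freq.size : Int) > k then
      match PySem.List.pyGet? A left with
      | none => (left, freq, curr)
      | some x =>
        let freq1 := freq.insert x (freq.getD x 0 - 1)      -- freq[A[left]] -= 1 (defaultdict)
        let curr1 := curr - x
        let freq2 := if freq1.getD x 0 = 0 then freq1.erase x else freq1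
        maxArrSumWhile A k fuel (left + 1) freq2 curr1
    else (left, freq, curr)

-- body of `for right in range(N)`; state (left, freq, max_sum, curr_sum)
def maxArrSumStep (A : List Int) (k : Int)
    (st : Int × PySem.Dict Int Int × Int × Int) (right : Int) :
    Int × PySem.Dict Int Int × Int × Int :=
  match PySem.List.pyGet? A right with
  | none => st                                              -- IndexError; unreachable under Pre_
  | some x =>
    let left := st.1
    let freq := st.2.1
    let maxs := st.2.2.1
    let curr := st.2.2.2
    let freq := freq.insert x (freq.getD x 0 + 1)           -- freq[A[right]] += 1
    let curr := curr + x
    let w := maxArrSumWhile A k (A.length + 1) left freq curr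
    (w.1, w.2.1, max maxs w.2.2, w.2.2)

def max_arr_sum (A : List Int) (N : Int) (k : Int) : Int :=
  ((PySem.List.pyRange 0 N 1).foldl (maxArrSumStep A k)
    (0, PySem.Dict.empty, 0, 0)).2.2.1

-- ===== PORT B =====
-- inner `while i >= 0 and (A[i] in seen or len(seen) < k)` loop of B; the Nat
-- argument is i+1 (0 means i = -1, the loop exit); pyGet? none unreachable under Pre_.
def maxArrSumScan (A : List Int) (k : Int) :
    Nat → PySem.Set Int → Int → Int
  | 0, _, s => s
  | i+1, seen, s =>
    match PySem.List.pyGet? A (i : Int) with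
    | none => s                                             -- unreachable under Pre_
    | some x =>
      if seen.contains x || PySem.Set.len seen < k then
        maxArrSumScan A k i (seen.add x) (s + x)
      else s

def max_arr_sum_alt (A : List Int) (N : Int) (k : Int) : Int :=
  (PySem.List.pyRange 0 N 1).foldl
    (fun best right =>
      max best (maxArrSumScan A k (right.toNat + 1) PySem.Set.empty 0)) 0

-- ===== PRECONDITION & SPEC =====
-- Pre_ excludes exactly the inputs where A raises IndexError: N > len(A) (direct
-- out-of-range read), and k < 0 with 0 < N (the while-loop walks left off the array).
def Pre_max_arr_sum (A : List Int) (N : Int) (k : Int) : Prop :=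
  N ≤ (A.length : Int) ∧ (0 ≤ k ∨ N ≤ 0)
instance (A : List Int) (N : Int) (k : Int) : Decidable (Pre_max_arr_sum A N k) := by
  unfold Pre_max_arr_sum; infer_instance

def pvWitness_max_arr_sum : List Int × Int × Int := ([1, 2, 1, -3, 2], 5, 2)

-- On inputs with k < 0 and 0 < N ≤ len(A), A raises IndexError (its while-loop can
-- never satisfy len(freq) ≤ k and walks the left pointer off the array), while B
-- returns the best window sum there, 0, since no window is valid.
def Raises_max_arr_sum (A : List Int) (N : Int) (k : Int) : Prop :=
  N ≤ (A.length : Int) ∧ k < 0 ∧ 0 < N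
instance (A : List Int) (N : Int) (k : Int) : Decidable (Raises_max_arr_sum A N k) := by
  unfold Raises_max_arr_sum; infer_instance
def pvRaiseWitness_max_arr_sum : List Int × Int × Int := ([5], 1, -1)
def pvRaiseWitnessOut_max_arr_sum : Int := 0

def Spec_max_arr_sum (A : List Int) (N : Int) (k : Int) (out : Int) : Prop :=
  out = max_arr_sum_alt A N k
instance (A : List Int) (N : Int) (k : Int) (out : Int) : Decidable (Spec_max_arr_sum A N k out) := by
  unfold Spec_max_arr_sum; infer_instance

-- ===== CLAIM (what is proved, stated in full; the proofs are below) =====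
def Claim_equal_max_arr_sum : Prop := ∀ (A : List Int) (N : Int) (k : Int),
  Dom_max_arr_sum A N k → Pre_max_arr_sum A N k → Spec_max_arr_sum A N k (max_arr_sum A N k)

def Claim_raises_max_arr_sum : Prop :=
  (∀ (A : List Int) (N : Int) (k : Int), Dom_max_arr_sum A N k →
    Raises_max_arr_sum A N k → ¬ Pre_max_arr_sum A N k) ∧
  (Dom_max_arr_sum (pvRaiseWitness_max_arr_sum.1) (pvRaiseWitness_max_arr_sum.2.1) (pvRaiseWitness_max_arr_sum.2.2) ∧
   Raises_max_arr_sum (pvRaiseWitness_max_arr_sum.1) (pvRaiseWitness_max_arr_sum.2.1) (pvRaiseWitness_max_arr_sum.2.2) ∧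
   max_arr_sum_alt (pvRaiseWitness_max_arr_sum.1) (pvRaiseWitness_max_arr_sum.2.1) (pvRaiseWitness_max_arr_sum.2.2) = pvRaiseWitnessOut_max_arr_sum)

-- ===== LEMMAS AND PROOFS =====

-- the window A[l:r] both programs reason about
def pvWin (A : List Int) (l r : Nat) : List Int := (A.take r).drop l
-- number of distinct values in the window
def pvD (A : List Int) (l r : Nat) : Nat := (pvWin A l r).toFinset.card
-- l is a valid left end for the window ending (exclusively) at r
def pvOk (A : List Int) (k : Int) (r l : Nat) : Prop := (pvD A l r : Int) ≤ k
-- the least valid left end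
noncomputable def pvM (A : List Int) (k : Int) (r : Nat) : Nat := sInf {l | pvOk A k r l}
-- the sum of the longest valid window ending at r, and the running best
noncomputable def pvWsum (A : List Int) (k : Int) (r : Nat) : Int := (pvWin A (pvM A k r) r).sum
noncomputable def pvBest (A : List Int) (k : Int) (n : Nat) : Int :=
  (List.range n).foldl (fun b r => max b (pvWsum A k (r + 1))) 0

theorem pvWin_nil (A : List Int) {l r : Nat} (h : r ≤ l) : pvWin A l r = [] := by
  unfold pvWin
  exact List.drop_eq_nil_of_le (by simp; omega)

theorem pvWin_succ (A : List Int) {l r : Nat} (hlr : l ≤ r) (hr : r < A.length) :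
    pvWin A l (r + 1) = pvWin A l r ++ [A[r]] := by
  unfold pvWin
  rw [List.take_add_one, List.getElem?_eq_getElem hr]
  rw [List.drop_append_of_le_length (by simp; omega)]
  simp

theorem pvWin_cons (A : List Int) {l r : Nat} (hlr : l < r) (hr : r ≤ A.length) :
    pvWin A l r = A[l]'(by omega) :: pvWin A (l + 1) r := by
  unfold pvWin
  rw [List.drop_eq_getElem_cons (by simp; omega)]
  simp [List.getElem_take]

theorem pvOk_mono (A : List Int) (k : Int) {r l l' : Nat} (h : l ≤ l') (hok : pvOk A k r l) :
    pvOk A k r l' := by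
  unfold pvOk pvD at *
  have hsub : pvWin A l' r ⊆ pvWin A l r := by
    unfold pvWin
    have : (A.take r).drop l' = ((A.take r).drop l).drop (l' - l) := by
      rw [List.drop_drop]; congr 1; omega
    rw [this]; exact List.drop_subset _ _
  have hc : (pvWin A l' r).toFinset.card ≤ (pvWin A l r).toFinset.card :=
    Finset.card_le_card (fun x hx => List.mem_toFinset.2 (hsub (List.mem_toFinset.1 hx)))
  omega

theorem pvOk_self (A : List Int) {k : Int} (hk : 0 ≤ k) (r : Nat) : pvOk A k r r := by
  unfold pvOk pvD
  rw [pvWin_nil A (le_refl r)]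
  simpa using hk

theorem pvM_ok (A : List Int) {k : Int} (hk : 0 ≤ k) (r : Nat) : pvOk A k r (pvM A k r) := by
  have : {l | pvOk A k r l}.Nonempty := ⟨r, pvOk_self A hk r⟩
  exact Nat.sInf_mem this

theorem pvM_le (A : List Int) {k : Int} {r l : Nat} (h : pvOk A k r l) : pvM A k r ≤ l := by
  exact Nat.sInf_le h

theorem pvM_le_self (A : List Int) {k : Int} (hk : 0 ≤ k) (r : Nat) : pvM A k r ≤ r := by
  exact pvM_le A (pvOk_self A hk r)

theorem pvOk_iff_M_le (A : List Int) {k : Int} (hk : 0 ≤ k) (r l : Nat) :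
    pvOk A k r l ↔ pvM A k r ≤ l := by
  constructor
  · exact fun h => pvM_le A h
  · exact fun h => pvOk_mono A k h (pvM_ok A hk r)

theorem pvM_mono (A : List Int) {k : Int} (hk : 0 ≤ k) {r : Nat} (hr : r < A.length) :
    pvM A k r ≤ pvM A k (r + 1) := by
  by_cases h : pvM A k (r+1) ≤ r
  · have hok : pvOk A k (r+1) (pvM A k (r+1)) := pvM_ok A hk (r+1)
    have : pvOk A k r (pvM A k (r+1)) := by
      unfold pvOk pvD at *
      have hsub : pvWin A (pvM A k (r+1)) r ⊆ pvWin A (pvM A k (r+1)) (r+1) := by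
        rw [pvWin_succ A h hr]; exact fun x hx => List.mem_append_left _ hx
      have hc : (pvWin A (pvM A k (r+1)) r).toFinset.card ≤ (pvWin A (pvM A k (r+1)) (r+1)).toFinset.card :=
        Finset.card_le_card (fun x hx => List.mem_toFinset.2 (hsub (List.mem_toFinset.1 hx)))
      omega
    exact le_trans (pvM_le A this) (le_refl _)
  · have := pvM_le_self A hk r
    omega


-- generic: a nodup list enumerating the members of w has length = #distinct(w)
theorem pvNodupLen (l w : List Int) (hnd : l.Nodup) (hmem : ∀ x, x ∈ l ↔ x ∈ w) :
    l.length = w.toFinset.card := by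
  rw [← List.toFinset_card_of_nodup hnd]
  congr 1
  ext x
  simp only [List.mem_toFinset]
  exact hmem x

theorem pvSize_eq (d : PySem.Dict Int Int) (w : List Int) (hnd : d.keys.Nodup)
    (hmem : ∀ x, d.contains x = true ↔ x ∈ w) : d.size = w.toFinset.card := by
  have hk : d.size = d.keys.length := by
    simp [PySem.Dict.size, PySem.Dict.keys]
  rw [hk]
  exact pvNodupLen _ _ hnd (fun x => by rw [← PySem.Dict.contains_iff_mem_keys]; exact hmem x)

theorem pvFind?_filter_ne (l : List (Int × Int)) (a x : Int) (h : x ≠ a) :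
    (l.filter (fun p => !(p.1 == a))).find? (fun p => p.1 == x) = l.find? (fun p => p.1 == x) := by
  induction l with
  | nil => rfl
  | cons p rest ih =>
    by_cases hp : p.1 = a
    · have h1 : (!(p.1 == a)) = false := by simp [hp]
      have h2 : (p.1 == x) = false := by
        simp only [beq_eq_false_iff_ne, ne_eq]
        intro e; exact h (by omega)
      simp only [List.filter_cons, h1, Bool.false_eq_true, if_false, List.find?_cons, h2]
      exact ih
    · have h1 : (!(p.1 == a)) = true := by simp [hp]
      simp only [List.filter_cons, h1, if_true, List.find?_cons]
      cases hfx : (p.1 == x) with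
      | true => rfl
      | false => exact ih

theorem pvGet?_erase (d : PySem.Dict Int Int) (a x : Int) :
    (d.erase a).get? x = if x = a then none else d.get? x := by
  unfold PySem.Dict.erase PySem.Dict.get?
  by_cases h : x = a
  · subst h
    rw [if_pos rfl, List.find?_eq_none.2]
    · rfl
    · intro p hp
      have := (List.mem_filter.1 hp).2
      simp at this ⊢
      omega
  · rw [if_neg h, pvFind?_filter_ne _ _ _ h]

theorem pvGetD_erase (d : PySem.Dict Int Int) (a x : Int) (v : Int) :
    (d.erase a).getD x v = if x = a then v else d.getD x v := by
  unfold PySem.Dict.getD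
  rw [pvGet?_erase]
  by_cases h : x = a <;> simp [h]

theorem pvKeys_erase (d : PySem.Dict Int Int) (a : Int) :
    (d.erase a).keys = d.keys.filter (fun y => !(y == a)) := by
  unfold PySem.Dict.erase PySem.Dict.keys
  simp [List.filter_map]
  rfl

theorem pvNodup_keys_erase (d : PySem.Dict Int Int) (a : Int) (h : d.keys.Nodup) :
    (d.erase a).keys.Nodup := by
  rw [pvKeys_erase]
  exact h.filter _

theorem pvMem_keys_erase (d : PySem.Dict Int Int) (a x : Int) :
    x ∈ (d.erase a).keys ↔ x ∈ d.keys ∧ x ≠ a := by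
  rw [pvKeys_erase]
  simp

-- distinct-count step facts
theorem pvD_cons_mem (A : List Int) {l r : Nat} (hlr : l < r) (hr : r ≤ A.length)
    (h : A[l]'(by omega) ∈ pvWin A (l+1) r) : pvD A l r = pvD A (l+1) r := by
  unfold pvD
  rw [pvWin_cons A hlr hr, List.toFinset_cons, Finset.insert_eq_self.2 (List.mem_toFinset.2 h)]

theorem pvD_cons_not_mem (A : List Int) {l r : Nat} (hlr : l < r) (hr : r ≤ A.length)
    (h : A[l]'(by omega) ∉ pvWin A (l+1) r) : pvD A l r = pvD A (l+1) r + 1 := by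
  unfold pvD
  rw [pvWin_cons A hlr hr, List.toFinset_cons,
    Finset.card_insert_of_notMem (fun hm => h (List.mem_toFinset.1 hm))]

-- ========== B side ==========
theorem pvScan (A : List Int) (k : Int) (hk : 0 ≤ k) (r : Nat) (hr : r < A.length) :
    ∀ (i : Nat), i ≤ r + 1 → pvM A k (r+1) ≤ i →
      ∀ (seen : PySem.Set Int) (s : Int), seen.Nodup →
        (∀ x, x ∈ seen ↔ x ∈ pvWin A i (r+1)) →
        maxArrSumScan A k i seen s = s + (pvWin A (pvM A k (r+1)) i).sum := by
  intro i
  induction i with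
  | zero =>
    intro _ hm seen s _ _
    have hm0 : pvM A k (r+1) = 0 := Nat.le_zero.1 hm
    simp [maxArrSumScan, hm0, pvWin_nil A (le_refl 0)]
  | succ i ih =>
    intro hi hm seen s hnd hmem
    have hiL : i < A.length := by omega
    have hgx : PySem.List.pyGet? A (i : Int) = some (A[i]'hiL) := by
      simp [PySem.List.pyGet?_natCast, List.getElem?_eq_getElem hiL]
    have hcons : pvWin A i (r+1) = A[i]'hiL :: pvWin A (i+1) (r+1) :=
      pvWin_cons A (by omega) (by omega)
    have hlen : seen.length = pvD A (i+1) (r+1) := pvNodupLen _ _ hnd hmem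
    have hok1 : pvOk A k (r+1) (i+1) := (pvOk_iff_M_le A hk _ _).2 hm
    by_cases hmle : pvM A k (r+1) ≤ i
    · -- the loop condition holds; one more step
      have hok0 : pvOk A k (r+1) i := (pvOk_iff_M_le A hk _ _).2 hmle
      have hcond : (seen.contains (A[i]'hiL) || PySem.Set.len seen < k) = true := by
        by_cases hin : A[i]'hiL ∈ pvWin A (i+1) (r+1)
        · simp [PySem.Set.contains, (hmem _).2 hin]
        · have hD : pvD A i (r+1) = pvD A (i+1) (r+1) + 1 :=
            pvD_cons_not_mem A (by omega) (by omega) hin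
          have : (pvD A (i+1) (r+1) : Int) < k := by
            unfold pvOk at hok0; omega
          simp only [PySem.Set.len, hlen, Bool.or_eq_true, decide_eq_true_eq]
          right; exact this
      simp only [maxArrSumScan, hgx, hcond, if_true]
      rw [ih (by omega) hmle (seen.add _) (s + A[i]'hiL)
        (PySem.Set.nodup_add _ _ hnd)
        (fun y => by
          rw [PySem.Set.mem_add, hmem y, hcons]
          simp [List.mem_cons]
          tauto)]
      rw [pvWin_succ A hmle hiL]
      simp [List.sum_append]
      ring
    · -- the loop condition fails: i+1 is the least valid left end
      have hmeq : pvM A k (r+1) = i + 1 := by omega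
      have hnin : A[i]'hiL ∉ pvWin A (i+1) (r+1) := by
        intro hin
        have hD : pvD A i (r+1) = pvD A (i+1) (r+1) :=
          pvD_cons_mem A (by omega) (by omega) hin
        have : pvOk A k (r+1) i := by unfold pvOk at hok1 ⊢; omega
        exact hmle ((pvOk_iff_M_le A hk _ _).1 this)
      have hklen : ¬ (PySem.Set.len seen < k) := by
        intro hlt
        have hD : pvD A i (r+1) = pvD A (i+1) (r+1) + 1 :=
          pvD_cons_not_mem A (by omega) (by omega) hnin
        have : pvOk A k (r+1) i := by
          unfold pvOk
          simp only [PySem.Set.len, hlen] at hlt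
          omega
        exact hmle ((pvOk_iff_M_le A hk _ _).1 this)
      have hcond : (seen.contains (A[i]'hiL) || PySem.Set.len seen < k) = false := by
        simp only [Bool.or_eq_false_iff]
        constructor
        · simp [PySem.Set.contains]
          intro hin; exact hnin ((hmem _).1 hin)
        · exact decide_eq_false hklen
      simp only [maxArrSumScan, hgx]
      rw [if_neg]
      · simp [hmeq, pvWin_nil A (le_refl (i+1))]
      · intro hc
        simp only [Bool.or_eq_true, PySem.Set.contains, List.contains_iff_mem,
          decide_eq_true_eq] at hc
        rcases hc with hc | hc
        · exact hnin ((hmem _).1 hc)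
        · exact hklen (by simpa [PySem.Set.len] using hc)

theorem pvScan_top (A : List Int) (k : Int) (hk : 0 ≤ k) (r : Nat) (hr : r < A.length) :
    maxArrSumScan A k (r+1) PySem.Set.empty 0 = pvWsum A k (r+1) := by
  have := pvScan A k hk r hr (r+1) (le_refl _) (pvM_le_self A hk (r+1))
    PySem.Set.empty 0 (List.nodup_nil)
    (fun x => by simp [PySem.Set.empty, pvWin_nil A (le_refl (r+1))])
  rw [this]
  unfold pvWsum
  simp

-- ========== A side ==========
theorem pvWhile (A : List Int) (k : Int) (hk : 0 ≤ k) (r : Nat) (hr : r ≤ A.length) :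
    ∀ (fuel : Nat) (l : Nat) (freq : PySem.Dict Int Int) (curr : Int),
      l ≤ pvM A k r → pvM A k r ≤ l + fuel →
      freq.keys.Nodup →
      (∀ x, freq.getD x 0 = ((pvWin A l r).count x : Int)) →
      (∀ x, freq.contains x = true ↔ x ∈ pvWin A l r) →
      curr = (pvWin A l r).sum →
      ∃ freq', maxArrSumWhile A k fuel (l : Int) freq curr =
          ((pvM A k r : Int), freq', (pvWin A (pvM A k r) r).sum) ∧
        freq'.keys.Nodup ∧
        (∀ x, freq'.getD x 0 = ((pvWin A (pvM A k r) r).count x : Int)) ∧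
        (∀ x, freq'.contains x = true ↔ x ∈ pvWin A (pvM A k r) r) := by
  intro fuel
  induction fuel with
  | zero =>
    intro l freq curr hlm hml hnd hcnt hcont hsum
    have hleq : l = pvM A k r := by omega
    subst hleq
    exact ⟨freq, by simp [maxArrSumWhile, hsum], hnd, hcnt, hcont⟩
  | succ fuel ih =>
    intro l freq curr hlm hml hnd hcnt hcont hsum
    have hsize : freq.size = pvD A l r := pvSize_eq freq (pvWin A l r) hnd hcont
    by_cases hvalid : pvM A k r ≤ l
    · have hleq : l = pvM A k r := by omega
      have hok : pvOk A k r l := (pvOk_iff_M_le A hk _ _).2 hvalid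
      have hcond : ¬ ((freq.size : Int) > k) := by
        unfold pvOk at hok; omega
      refine ⟨freq, ?_, hnd, by rw [hleq] at hcnt; exact hcnt, by rw [hleq] at hcont; exact hcont⟩
      simp only [maxArrSumWhile]
      rw [if_neg hcond, hleq, hsum, hleq]
    · -- one shrink step
      have hnok : ¬ pvOk A k r l := fun h => hvalid ((pvOk_iff_M_le A hk _ _).1 h)
      have hcond : ((freq.size : Int) > k) := by
        unfold pvOk at hnok; omega
      have hmr : pvM A k r ≤ r := pvM_le_self A hk r
      have hlr : l < r := by omega
      have hlL : l < A.length := by omega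
      have hgx : PySem.List.pyGet? A (l : Int) = some (A[l]'hlL) := by
        simp [PySem.List.pyGet?_natCast, List.getElem?_eq_getElem hlL]
      have hcons : pvWin A l r = A[l]'hlL :: pvWin A (l+1) r := pvWin_cons A hlr (by omega)
      have hgd1 : ∀ y, (freq.insert (A[l]'hlL) (freq.getD (A[l]'hlL) 0 - 1)).getD y 0 =
          ((pvWin A (l+1) r).count y : Int) := by
        intro y
        rw [PySem.Dict.getD_insert]
        by_cases hy : y = A[l]'hlL
        · rw [if_pos hy, hcnt, hcons, hy]
          simp [List.count_cons_self]
        · rw [if_neg hy, hcnt, hcons, List.count_cons_of_ne (fun e => hy e.symm)]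
      have hct1 : ∀ y, (freq.insert (A[l]'hlL) (freq.getD (A[l]'hlL) 0 - 1)).contains y = true ↔
          (y = A[l]'hlL ∨ y ∈ pvWin A (l+1) r) := by
        intro y
        rw [PySem.Dict.contains_insert]
        simp only [Bool.or_eq_true, beq_iff_eq]
        rw [hcont y, hcons, List.mem_cons]
        tauto
      have hnd1 : (freq.insert (A[l]'hlL) (freq.getD (A[l]'hlL) 0 - 1)).keys.Nodup :=
        PySem.Dict.nodup_keys_insert _ _ _ hnd
      have hsum1 : curr - A[l]'hlL = (pvWin A (l+1) r).sum := by
        rw [hsum, hcons]; simp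
      have hcast : ((l : Int) + 1) = ((l + 1 : Nat) : Int) := by push_cast; ring
      by_cases hxw : A[l]'hlL ∈ pvWin A (l+1) r
      · -- the count stays positive: no deletion
        have hne0 : ¬ ((freq.insert (A[l]'hlL) (freq.getD (A[l]'hlL) 0 - 1)).getD (A[l]'hlL) 0 = 0) := by
          rw [hgd1]
          have := List.count_pos_iff.2 hxw
          omega
        obtain ⟨freq', heq, h1, h2, h3⟩ := ih (l+1) _ (curr - A[l]'hlL) (by omega) (by omega)
          hnd1 hgd1
          (fun y => by
            rw [hct1 y]
            constructor
            · rintro (hy | hy)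
              · rw [hy]; exact hxw
              · exact hy
            · exact fun hy => Or.inr hy)
          hsum1
        refine ⟨freq', ?_, h1, h2, h3⟩
        simp only [maxArrSumWhile, hgx]
        rw [if_pos hcond, if_neg hne0, hcast, heq]
      · -- count drops to zero: the key is deleted
        have he0 : (freq.insert (A[l]'hlL) (freq.getD (A[l]'hlL) 0 - 1)).getD (A[l]'hlL) 0 = 0 := by
          rw [hgd1]
          simp [List.count_eq_zero.2 hxw]
        have hnd2 := pvNodup_keys_erase _ (A[l]'hlL) hnd1
        have hgd2 : ∀ y, ((freq.insert (A[l]'hlL) (freq.getD (A[l]'hlL) 0 - 1)).erase (A[l]'hlL)).getD y 0 =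
            ((pvWin A (l+1) r).count y : Int) := by
          intro y
          rw [pvGetD_erase]
          by_cases hy : y = A[l]'hlL
          · rw [if_pos hy, hy]
            simp [List.count_eq_zero.2 hxw]
          · rw [if_neg hy, hgd1]
        have hct2 : ∀ y, ((freq.insert (A[l]'hlL) (freq.getD (A[l]'hlL) 0 - 1)).erase (A[l]'hlL)).contains y = true ↔
            y ∈ pvWin A (l+1) r := by
          intro y
          rw [PySem.Dict.contains_iff_mem_keys, pvMem_keys_erase]
          rw [← PySem.Dict.contains_iff_mem_keys, hct1 y]
          constructor
          · rintro ⟨hy1 | hy1, hy2⟩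
            · exact absurd hy1 hy2
            · exact hy1
          · intro hy
            refine ⟨Or.inr hy, ?_⟩
            intro he; rw [he] at hy; exact hxw hy
        obtain ⟨freq', heq, h1, h2, h3⟩ := ih (l+1) _ (curr - A[l]'hlL) (by omega) (by omega)
          hnd2 hgd2 hct2 hsum1
        refine ⟨freq', ?_, h1, h2, h3⟩
        simp only [maxArrSumWhile, hgx]
        rw [if_pos hcond, if_pos he0, hcast, heq]

def pvAInv (A : List Int) (k : Int) (r : Nat) (st : Int × PySem.Dict Int Int × Int × Int) : Prop :=
  st.1 = (pvM A k r : Int) ∧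
  st.2.1.keys.Nodup ∧
  (∀ x, st.2.1.getD x 0 = ((pvWin A (pvM A k r) r).count x : Int)) ∧
  (∀ x, st.2.1.contains x = true ↔ x ∈ pvWin A (pvM A k r) r) ∧
  st.2.2.2 = (pvWin A (pvM A k r) r).sum ∧
  st.2.2.1 = pvBest A k r

theorem pvBest_succ (A : List Int) (k : Int) (n : Nat) :
    pvBest A k (n+1) = max (pvBest A k n) (pvWsum A k (n+1)) := by
  unfold pvBest
  rw [List.range_succ, List.foldl_append]
  simp

theorem pvStepInv (A : List Int) (k : Int) (hk : 0 ≤ k) {r : Nat} (hr : r < A.length)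
    (st : Int × PySem.Dict Int Int × Int × Int) (h : pvAInv A k r st) :
    pvAInv A k (r+1) (maxArrSumStep A k st (r : Int)) := by
  obtain ⟨h1, h2, h3, h4, h5, h6⟩ := h
  have hmr : pvM A k r ≤ r := pvM_le_self A hk r
  have hgx : PySem.List.pyGet? A (r : Int) = some (A[r]'hr) := by
    simp [PySem.List.pyGet?_natCast, List.getElem?_eq_getElem hr]
  have hW : pvWin A (pvM A k r) (r+1) = pvWin A (pvM A k r) r ++ [A[r]'hr] :=
    pvWin_succ A hmr hr
  have hgd1 : ∀ y, (st.2.1.insert (A[r]'hr) (st.2.1.getD (A[r]'hr) 0 + 1)).getD y 0 =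
      ((pvWin A (pvM A k r) (r+1)).count y : Int) := by
    intro y
    rw [PySem.Dict.getD_insert, hW]
    by_cases hy : y = A[r]'hr
    · rw [if_pos hy, h3, hy]
      simp [List.count_append]
    · have hy' : ¬ (A[r]'hr) = y := fun e => hy e.symm
      rw [if_neg hy, h3, List.count_append]
      simp [hy']
  have hct1 : ∀ y, (st.2.1.insert (A[r]'hr) (st.2.1.getD (A[r]'hr) 0 + 1)).contains y = true ↔
      y ∈ pvWin A (pvM A k r) (r+1) := by
    intro y
    rw [PySem.Dict.contains_insert, hW]
    simp only [Bool.or_eq_true, beq_iff_eq]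
    rw [h4 y, List.mem_append, List.mem_singleton]
    tauto
  have hnd1 := PySem.Dict.nodup_keys_insert st.2.1 (A[r]'hr) (st.2.1.getD (A[r]'hr) 0 + 1) h2
  have hsum1 : st.2.2.2 + A[r]'hr = (pvWin A (pvM A k r) (r+1)).sum := by
    rw [h5, hW]; simp
  obtain ⟨freq', heq, hd1, hd2, hd3⟩ := pvWhile A k hk (r+1) (by omega) (A.length + 1)
    (pvM A k r) _ _ (pvM_mono A hk hr)
    (by have := pvM_le_self A hk (r+1); omega)
    hnd1 hgd1 hct1 hsum1
  unfold pvAInv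
  simp only [maxArrSumStep, hgx, h1, heq]
  refine ⟨trivial, hd1, hd2, hd3, trivial, ?_⟩
  rw [h6, pvBest_succ]
  rfl

theorem pvFold (A : List Int) (k : Int) (hk : 0 ≤ k) {n : Nat} (hn : n ≤ A.length) :
    pvAInv A k n ((List.range n).foldl (fun st (j : Nat) => maxArrSumStep A k st (j : Int))
      (0, PySem.Dict.empty, 0, 0)) := by
  induction n with
  | zero =>
    have hm0 : pvM A k 0 = 0 := Nat.le_zero.1 (pvM_le_self A hk 0)
    simp only [List.range_zero, List.foldl_nil]
    unfold pvAInv pvBest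
    rw [hm0, pvWin_nil A (le_refl 0)]
    simp [PySem.Dict.getD_empty, PySem.Dict.contains_empty, PySem.Dict.keys_empty]
  | succ n ih =>
    rw [List.range_succ, List.foldl_append, List.foldl_cons, List.foldl_nil]
    exact pvStepInv A k hk (by omega) _ (ih (by omega))

theorem pvA_eq (A : List Int) (k : Int) (hk : 0 ≤ k) {N : Int} (hN : N ≤ (A.length : Int)) :
    max_arr_sum A N k = pvBest A k N.toNat := by
  have hn : N.toNat ≤ A.length := by omega
  unfold max_arr_sum
  rw [PySem.List.pyRange_one, List.foldl_map]
  have hfe : (fun st (j : Nat) => maxArrSumStep A k st (0 + (j : Int))) =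
      (fun st (j : Nat) => maxArrSumStep A k st (j : Int)) := by
    funext st j; rw [zero_add]
  have h := pvFold A k hk hn
  rw [show N - 0 = N by ring]
  rw [hfe]
  exact h.2.2.2.2.2

theorem pvB_eq (A : List Int) (k : Int) (hk : 0 ≤ k) {N : Int} (hN : N ≤ (A.length : Int)) :
    max_arr_sum_alt A N k = pvBest A k N.toNat := by
  have hn : N.toNat ≤ A.length := by omega
  unfold max_arr_sum_alt
  rw [PySem.List.pyRange_one, List.foldl_map]
  rw [show N - 0 = N by ring]
  rw [PySem.List.foldl_congr_mem _ _
    (fun b (j : Nat) => max b (pvWsum A k (j + 1))) 0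
    (fun acc j hj => by
      have hjn : j < N.toNat := List.mem_range.1 hj
      have hjL : j < A.length := by omega
      have ht : (0 + (j : Int)).toNat = j := by omega
      rw [ht, pvScan_top A k hk j hjL])]
  rfl

-- ===== VERDICT (by name: the statement is the Claim_ definition above) =====
theorem max_arr_sum_spec : Claim_equal_max_arr_sum := by
  intro A N k _ hpre
  unfold Spec_max_arr_sum
  rcases hpre with ⟨hN, hk | hN0⟩
  · rw [pvA_eq A k hk hN, pvB_eq A k hk hN]
  · have hrange : PySem.List.pyRange 0 N 1 = [] := by
      rw [PySem.List.pyRange_one]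
      have : (N - 0).toNat = 0 := by omega
      rw [this]
      rfl
    unfold max_arr_sum max_arr_sum_alt
    rw [hrange]
    rfl

@[simp] theorem max_arr_sum_raises : Claim_raises_max_arr_sum := by
  unfold Claim_raises_max_arr_sum
  exact ⟨by intro A N k _ hr hp; exact absurd hp (by unfold Raises_max_arr_sum Pre_max_arr_sum at *; omega),
         by decide⟩
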